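-- pv_equiv track=rewrite | github.com/tb-repo/DB-Buddy | streamlit_app.py | extract_sql_query
-- ===== SOURCE A (Python) =====
-- def extract_sql_query(user_input):
--     """Extract SQL query from user input"""
--     lines = user_input.split('\n')
--     sql_lines = []
--     in_sql = False
--
--     for line in lines:
--         line_lower = line.lower().strip()
--         if any(keyword in line_lower for keyword in ['select ', 'with ', 'insert ', 'update ', 'delete ']):
--             in_sql = True
--         if in_sql:
--             sql_lines.append(line.strip())
--             if line.strip().endswith(';'):
--                 break
--
--     return '\n'.join(sql_lines) if sql_lines else "[SQL query not clearly identified - please paste your complete query]"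
-- ===== SOURCE B (Python) =====
-- FALLBACK = "[SQL query not clearly identified - please paste your complete query]"
-- KEYWORDS = ['select ', 'with ', 'insert ', 'update ', 'delete ']
--
--
-- def extract_sql_query(user_input):
--     """Extract SQL query from user input (declarative: comprehensions + slicing, no flag loop)"""
--     lines = user_input.split('\n')
--     starts = [i for i, line in enumerate(lines)
--               if any(kw in line.lower().strip() for kw in KEYWORDS)]
--     if not starts:
--         return FALLBACK
--     stripped = [line.strip() for line in lines[starts[0]:]]
--     ends = [i for i, s in enumerate(stripped) if s.endswith(';')]
--     body = stripped if not ends else stripped[:ends[0] + 1]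
--     return '\n'.join(body)
-- ===== Notes on version B (the rewrite author's own statement) =====
-- stated objective: simpler
-- what changed: Replaces A's single stateful loop (in_sql flag, mid-loop break) by a declarative formulation: comprehensions over enumerate compute the list of keyword-line indices and, from the first one, the list of semicolon-terminated line indices, and the result is a slice of the stripped lines joined.
import Mathlib
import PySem

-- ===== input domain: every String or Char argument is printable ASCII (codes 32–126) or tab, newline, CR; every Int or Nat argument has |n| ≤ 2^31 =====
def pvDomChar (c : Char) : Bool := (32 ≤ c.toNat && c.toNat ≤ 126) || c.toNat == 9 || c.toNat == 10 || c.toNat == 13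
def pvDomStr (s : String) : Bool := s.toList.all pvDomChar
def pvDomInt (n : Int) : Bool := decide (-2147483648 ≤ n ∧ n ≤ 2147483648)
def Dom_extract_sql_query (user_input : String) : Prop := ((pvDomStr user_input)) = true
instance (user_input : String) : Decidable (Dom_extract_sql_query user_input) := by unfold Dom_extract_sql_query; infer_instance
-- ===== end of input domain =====

-- B replaces A's stateful in_sql-flag loop with mid-loop break by a declarative formulation:
-- comprehensions compute the candidate start and terminator indices, then slicing builds the body (objective: simpler).
-- ===== PORT A =====
def pvKeywords : List String := ["select ", "with ", "insert ", "update ", "delete "]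

def pvFallback : String := "[SQL query not clearly identified - please paste your complete query]"

def pvKwHit (line : String) : Bool :=
  pvKeywords.any (fun kw => PySem.Str.isIn kw (PySem.Str.strip (PySem.Str.lower line)))

-- A's for-loop over lines with state (sql_lines, in_sql) and a break on ';'
def pvALoop : List String → List String → Bool → List String
  | [], acc, _ => acc
  | line :: rest, acc, inSql =>
    let inSql' := if pvKwHit line then true else inSql
    if inSql' then
      let acc' := acc ++ [PySem.Str.strip line]
      if PySem.Str.endswith (PySem.Str.strip line) ";" then acc'
      else pvALoop rest acc' inSql'
    else pvALoop rest acc inSql'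

def extract_sql_query (user_input : String) : String :=
  let lines := (PySem.Str.split? user_input "\n").getD []
  let sql_lines := pvALoop lines [] false
  if sql_lines = [] then pvFallback else PySem.Str.join "\n" sql_lines

-- ===== PORT B =====
def extract_sql_query_alt (user_input : String) : String :=
  let lines := (PySem.Str.split? user_input "\n").getD []
  let starts := ((PySem.List.enumerate lines).filter (fun p => pvKwHit p.2)).map (·.1)
  match starts with
  | [] => pvFallback
  | s0 :: _ =>
    let stripped := (PySem.List.slice lines (some s0) none).map PySem.Str.strip
    let ends := ((PySem.List.enumerate stripped).filter (fun p => PySem.Str.endswith p.2 ";")).map (·.1)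
    let body := match ends with
      | [] => stripped
      | e0 :: _ => PySem.List.slice stripped none (some (e0 + 1))
    PySem.Str.join "\n" body

-- ===== PRECONDITION & SPEC =====
def Spec_extract_sql_query (user_input : String) (out : String) : Prop := out = extract_sql_query_alt user_input
instance (user_input : String) (out : String) : Decidable (Spec_extract_sql_query user_input out) := by unfold Spec_extract_sql_query; infer_instance

-- ===== CLAIM (what is proved, stated in full; the proofs are below) =====
def Claim_equal_extract_sql_query : Prop := ∀ (user_input : String), Dom_extract_sql_query user_input → Spec_extract_sql_query user_input (extract_sql_query user_input)

-- ===== LEMMAS AND PROOFS =====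
-- proof-side helper: first index of a list element satisfying f
def pvFirstIdx? {α : Type} (f : α → Bool) : List α → Option Nat
  | [] => none
  | x :: xs => if f x then some 0 else (pvFirstIdx? f xs).map (· + 1)

-- proof-side helper: B's collect phase written as a single recursion (old intermediate)
def pvBCollect : List String → List String
  | [] => []
  | line :: rest =>
    let s := PySem.Str.strip line
    if PySem.Str.endswith s ";" then [s] else s :: pvBCollect rest

-- head of the indices of the filtered enumeration = first matching index (shifted by the start offset)
theorem pvEnumFiltHead {α : Type} (f : α → Bool) (ls : List α) (n : Int) :
    (((PySem.List.enumerate ls n).filter (fun p => f p.2)).map (·.1)).head? =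
      (pvFirstIdx? f ls).map (fun i => n + (i : Int)) := by
  induction ls generalizing n with
  | nil => simp [PySem.List.enumerate_nil, pvFirstIdx?]
  | cons x xs ih =>
    simp only [PySem.List.enumerate_cons, List.filter_cons, pvFirstIdx?]
    by_cases h : f x
    · simp [h]
    · simp only [h, Bool.false_eq_true, if_false, ite_false]
      rw [ih]
      cases pvFirstIdx? f xs <;> simp <;> ring

-- once in_sql is true, A's loop appends exactly the collect phase
theorem pvALoop_true (ls : List String) (acc : List String) :
    pvALoop ls acc true = acc ++ pvBCollect ls := by
  induction ls generalizing acc with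
  | nil => simp [pvALoop, pvBCollect]
  | cons l rest ih =>
    simp only [pvALoop, pvBCollect, ite_self, if_pos]
    split <;> simp [ih]

-- A's full loop as: find the first keyword line, then collect from there
theorem pvALoop_false (ls : List String) :
    pvALoop ls [] false =
      match pvFirstIdx? pvKwHit ls with
      | none => []
      | some i => pvBCollect (ls.drop i) := by
  induction ls with
  | nil => simp [pvALoop, pvFirstIdx?]
  | cons l rest ih =>
    by_cases hk : pvKwHit l
    · simp only [pvALoop, pvFirstIdx?, hk, if_true, if_pos, List.nil_append, List.drop_zero]
      simp only [pvBCollect]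
      split <;> simp [pvALoop_true, pvBCollect]
    · simp only [pvALoop, pvFirstIdx?, hk, if_false, Bool.false_eq_true, ite_false]
      rw [ih]
      cases h : pvFirstIdx? pvKwHit rest <;> simp

-- the collect phase = map strip, truncated after the first ';'-terminated line
theorem pvBCollect_eq (ls : List String) :
    pvBCollect ls =
      match pvFirstIdx? (fun s => PySem.Str.endswith s ";") (ls.map PySem.Str.strip) with
      | none => ls.map PySem.Str.strip
      | some e => (ls.map PySem.Str.strip).take (e + 1) := by
  induction ls with
  | nil => simp [pvBCollect, pvFirstIdx?]
  | cons l rest ih =>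
    simp only [pvBCollect, List.map_cons, pvFirstIdx?]
    by_cases h : PySem.Str.endswith (PySem.Str.strip l) ";"
    · rw [if_pos h, if_pos h]; simp
    · simp only [h, Bool.false_eq_true, if_false, ite_false]
      rw [ih]
      cases hh : pvFirstIdx? (fun s => PySem.Str.endswith s ";") (rest.map PySem.Str.strip) <;> simp

theorem pvFirstIdx?_lt {α : Type} (f : α → Bool) (ls : List α) (i : Nat)
    (h : pvFirstIdx? f ls = some i) : i < ls.length := by
  induction ls generalizing i with
  | nil => simp [pvFirstIdx?] at h
  | cons x xs ih =>
    simp only [pvFirstIdx?] at h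
    split at h
    · cases h; simp
    · cases hh : pvFirstIdx? f xs with
      | none => rw [hh] at h; simp at h
      | some j =>
        rw [hh] at h; simp at h
        have := ih j hh
        simp [← h]; omega

-- the core of the verdict, stated over the split line list
theorem pvMain (ls : List String) :
    (if pvALoop ls [] false = [] then pvFallback
     else PySem.Str.join "\n" (pvALoop ls [] false)) =
      (match ((PySem.List.enumerate ls).filter (fun p => pvKwHit p.2)).map (·.1) with
       | [] => pvFallback
       | s0 :: _ =>
         let stripped := (PySem.List.slice ls (some s0) none).map PySem.Str.strip
         let ends := ((PySem.List.enumerate stripped).filter (fun p => PySem.Str.endswith p.2 ";")).map (·.1)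
         let body := match ends with
           | [] => stripped
           | e0 :: _ => PySem.List.slice stripped none (some (e0 + 1))
         PySem.Str.join "\n" body) := by
  have hA := pvALoop_false ls
  cases hs : (((PySem.List.enumerate ls).filter (fun p => pvKwHit p.2)).map (·.1)) with
  | nil =>
    have h0 := pvEnumFiltHead pvKwHit ls 0
    rw [hs] at h0
    cases hi : pvFirstIdx? pvKwHit ls with
    | some i => rw [hi] at h0; simp at h0
    | none =>
      rw [hi] at hA
      have hA2 : pvALoop ls [] false = [] := hA
      rw [hA2]
      rfl
  | cons s0 t =>
    have h0 := pvEnumFiltHead pvKwHit ls 0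
    rw [hs] at h0
    cases hi : pvFirstIdx? pvKwHit ls with
    | none => rw [hi] at h0; simp at h0
    | some i =>
      rw [hi] at h0
      simp at h0
      rw [hi] at hA
      have hA2 : pvALoop ls [] false = pvBCollect (ls.drop i) := hA
      rw [hA2]
      simp only [h0, PySem.List.slice_from_natCast]
      rw [pvBCollect_eq]
      cases he : pvFirstIdx? (fun s => PySem.Str.endswith s ";") ((ls.drop i).map PySem.Str.strip) with
      | none =>
        have h1 := pvEnumFiltHead (fun s => PySem.Str.endswith s ";") ((ls.drop i).map PySem.Str.strip) 0
        rw [he] at h1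
        have h2 : (((PySem.List.enumerate ((ls.drop i).map PySem.Str.strip)).filter
            (fun p => PySem.Str.endswith p.2 ";")).map (·.1)) = [] :=
          List.head?_eq_none_iff.mp (by rw [h1]; rfl)
        rw [h2]
        have hlt := pvFirstIdx?_lt _ _ _ hi
        have hd : ls.drop i ≠ [] := by
          intro hn; have := List.drop_eq_nil_iff.mp hn; omega
        have hne2 : (ls.drop i).map PySem.Str.strip ≠ [] := by
          simpa using hd
        show (if (ls.drop i).map PySem.Str.strip = [] then pvFallback
            else PySem.Str.join "\n" ((ls.drop i).map PySem.Str.strip)) =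
          PySem.Str.join "\n" ((ls.drop i).map PySem.Str.strip)
        rw [if_neg hne2]
      | some e =>
        have h1 := pvEnumFiltHead (fun s => PySem.Str.endswith s ";") ((ls.drop i).map PySem.Str.strip) 0
        rw [he] at h1
        simp only [Option.map_some, zero_add] at h1
        cases hl : (((PySem.List.enumerate ((ls.drop i).map PySem.Str.strip)).filter
            (fun p => PySem.Str.endswith p.2 ";")).map (·.1)) with
        | nil => rw [hl] at h1; simp at h1
        | cons e0 t2 =>
          rw [hl] at h1
          simp at h1
          simp only [h1]
          have hcast : ((e : Int) + 1) = ((e + 1 : Nat) : Int) := by push_cast; ring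
          rw [hcast, PySem.List.slice_to_natCast]
          have hne : ((ls.drop i).map PySem.Str.strip).take (e + 1) ≠ [] := by
            intro hn
            rcases List.take_eq_nil_iff.mp hn with h' | h'
            · omega
            · rw [h'] at he; simp [pvFirstIdx?] at he
          rw [if_neg hne]

-- ===== VERDICT (by name: the statement is the Claim_ definition above) =====
theorem extract_sql_query_spec : Claim_equal_extract_sql_query := by
  intro u _
  show _ = _
  unfold extract_sql_query extract_sql_query_alt
  exact pvMain ((PySem.Str.split? u "\n").getD [])
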